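-- pv_equiv track=rewrite | github.com/maddwiz/UnifiedStateCodec | src/usc/mem/dictpack.py | build_line_table
-- ===== SOURCE A (Python) =====
-- from typing import Dict, List, Tuple
--
-- def _split_lines_keepends(text: str) -> List[str]:
--     return text.splitlines(keepends=True)
--
-- def build_line_table(chunks: List[str]) -> Tuple[List[str], Dict[str, int]]:
--     """
--     Builds a shared table of unique lines across all chunks.
--     Returns:
--       table: list[index] -> line
--       index: dict[line] -> index
--     """
--     table: List[str] = []
--     index: Dict[str, int] = {}
--
--     for chunk in chunks:
--         for ln in _split_lines_keepends(chunk):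
--             if ln not in index:
--                 index[ln] = len(table)
--                 table.append(ln)
--
--     return table, index
-- ===== SOURCE B (Python) =====
-- from typing import Dict, List, Tuple
--
-- def _split_lines_keepends(text: str) -> List[str]:
--     return text.splitlines(keepends=True)
--
-- def build_line_table(chunks: List[str]) -> Tuple[List[str], Dict[str, int]]:
--     # Flatten once, then deduplicate WITHOUT any hash lookup: repeatedly take the
--     # first remaining line and filter every copy of it out of the rest.
--     lines = [ln for chunk in chunks for ln in _split_lines_keepends(chunk)]
--     table: List[str] = []
--     while lines:
--         head = lines[0]
--         table.append(head)
--         lines = [x for x in lines[1:] if x != head]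
--     # Index is a separate pass over the finished table.
--     index = {ln: i for i, ln in enumerate(table)}
--     return table, index
-- ===== Notes on version B (the rewrite author's own statement) =====
-- stated objective: alternative
-- what changed: B drops A's interleaved dict-membership dedup entirely: it flattens all lines, then deduplicates by repeatedly taking the first remaining line and filtering all its copies out of the rest (no membership test, no dict during dedup), and only afterwards builds the index by enumerating the finished table.
import Mathlib
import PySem

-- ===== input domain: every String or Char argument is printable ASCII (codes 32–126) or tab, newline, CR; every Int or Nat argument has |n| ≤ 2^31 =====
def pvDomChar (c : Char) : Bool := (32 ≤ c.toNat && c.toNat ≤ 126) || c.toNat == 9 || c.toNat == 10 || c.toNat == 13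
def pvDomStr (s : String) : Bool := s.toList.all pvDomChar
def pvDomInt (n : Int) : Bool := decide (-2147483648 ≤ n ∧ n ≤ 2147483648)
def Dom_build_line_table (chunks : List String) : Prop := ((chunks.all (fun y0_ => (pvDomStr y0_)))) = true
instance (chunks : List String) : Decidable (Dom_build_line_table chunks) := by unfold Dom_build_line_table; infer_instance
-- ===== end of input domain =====

-- B deduplicates by repeated filter-out of the first remaining line (no dict during dedup),
-- then builds the index in a separate enumeration pass; objective: alternative.

-- ===== PORT A =====
-- hand port of str.splitlines(keepends=True); exact on the Dom alphabet, whose only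
-- line-break characters are '\n', '\r' and the pair "\r\n"
def splitKeepGo (acc : List Char) : List Char → List (List Char)
  | [] => if acc.isEmpty then [] else [acc.reverse]
  | '\r' :: '\n' :: rest => (acc.reverse ++ ['\r', '\n']) :: splitKeepGo [] rest
  | '\r' :: rest => (acc.reverse ++ ['\r']) :: splitKeepGo [] rest
  | '\n' :: rest => (acc.reverse ++ ['\n']) :: splitKeepGo [] rest
  | c :: rest => splitKeepGo (c :: acc) rest
termination_by cs => cs.length
decreasing_by all_goals (simp; try omega)

def split_lines_keepends (text : String) : List String :=
  (splitKeepGo [] text.toList).map String.ofList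

def build_line_table (chunks : List String) : List String × (List (String × Int)) :=
  let st : List String × PySem.Dict String Int :=
    chunks.foldl (fun s chunk =>
      (split_lines_keepends chunk).foldl (fun s ln =>
        if s.2.contains ln then s
        else (s.1 ++ [ln], s.2.insert ln (s.1.length : Int))) s)
      ([], PySem.Dict.empty)
  (st.1, st.2.items)

-- ===== PORT B =====
-- the while loop: take the first remaining line, filter every copy of it out of the rest
def uniqLoop (table : List String) (lines : List String) : List String :=
  match lines with
  | [] => table
  | head :: rest => uniqLoop (table ++ [head]) (rest.filter (fun x => x != head))
termination_by lines.length
decreasing_by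
  simp
  exact List.length_filter_le _ _

def build_line_table_alt (chunks : List String) : List String × (List (String × Int)) :=
  let lines := chunks.flatMap (fun chunk => split_lines_keepends chunk)
  let table := uniqLoop [] lines
  let index := (PySem.List.enumerate table 0).foldl
      (fun d p => d.insert p.2 p.1) PySem.Dict.empty
  (table, index.items)

-- ===== PRECONDITION & SPEC =====
def Spec_build_line_table (chunks : List String) (out : List String × (List (String × Int))) : Prop := out = build_line_table_alt chunks
instance (chunks : List String) (out : List String × (List (String × Int))) : Decidable (Spec_build_line_table chunks out) := by unfold Spec_build_line_table; infer_instance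

-- ===== CLAIM (what is proved, stated in full; the proofs are below) =====
def Claim_equal_build_line_table : Prop := ∀ (chunks : List String), Dom_build_line_table chunks → Spec_build_line_table chunks (build_line_table chunks)

-- ===== LEMMAS AND PROOFS =====

-- the (line ↦ index) pairs a finished table determines
def pvPairs (t : List String) : List (String × Int) :=
  (PySem.List.enumerate t 0).map (fun p => (p.2, p.1))

def pvStep (s : List String × PySem.Dict String Int) (ln : String) :
    List String × PySem.Dict String Int :=
  if s.2.contains ln then s else (s.1 ++ [ln], s.2.insert ln (s.1.length : Int))

-- recursive form of B's while loop, without the accumulator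
def pvUniq (lines : List String) : List String :=
  match lines with
  | [] => []
  | head :: rest => head :: pvUniq (rest.filter (fun x => x != head))
termination_by lines.length
decreasing_by
  simp
  exact List.length_filter_le _ _

theorem pvUniq_cons (head : String) (rest : List String) :
    pvUniq (head :: rest) = head :: pvUniq (rest.filter (fun x => x != head)) := by
  rw [pvUniq]

theorem pvUniqLoop_eq (n : Nat) (lines : List String) (hn : lines.length ≤ n)
    (table : List String) : uniqLoop table lines = table ++ pvUniq lines := by
  induction n generalizing lines table with
  | zero =>
      have : lines = [] := List.eq_nil_of_length_eq_zero (Nat.le_zero.mp hn)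
      subst this; simp [uniqLoop, pvUniq]
  | succ n ih =>
      match lines with
      | [] => simp [uniqLoop, pvUniq]
      | head :: rest =>
          rw [uniqLoop, pvUniq_cons,
            ih _ (Nat.le_trans (List.length_filter_le _ _) (Nat.le_of_succ_le_succ hn)) _]
          simp

theorem pvUpdate_eq_uniq (lines : List String) (acc : List String) :
    PySem.Set.update acc lines =
      acc ++ pvUniq (lines.filter (fun y => !acc.contains y)) := by
  induction lines generalizing acc with
  | nil => simp [PySem.Set.update, pvUniq]
  | cons x xs ih =>
      have hupd : PySem.Set.update acc (x :: xs) = PySem.Set.update (PySem.Set.add acc x) xs := by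
        simp [PySem.Set.update]
      rw [hupd, ih]
      by_cases h : acc.contains x = true
      · have hm : x ∈ acc := by simpa using h
        have hadd : PySem.Set.add acc x = acc := by
          simp [PySem.Set.add, PySem.Set.contains, hm]
        rw [hadd]
        simp [hm]
      · have hm : x ∉ acc := by simpa using h
        have hadd : PySem.Set.add acc x = acc ++ [x] := by
          simp [PySem.Set.add, PySem.Set.contains, hm]
        rw [hadd]
        have hfil : xs.filter (fun y => !(acc ++ [x]).contains y) =
            (xs.filter (fun y => !acc.contains y)).filter (fun y => y != x) := by
          rw [List.filter_filter]
          apply List.filter_congr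
          intro a _
          by_cases hax : a = x <;> simp [hax, hm]
        rw [hfil]
        have hcons : (x :: xs).filter (fun y => !acc.contains y) =
            x :: xs.filter (fun y => !acc.contains y) := by
          simp [hm]
        rw [hcons, pvUniq_cons]
        simp

theorem pvUniqLoop_dedup (lines : List String) :
    uniqLoop [] lines = PySem.List.dedup lines := by
  have h := pvUpdate_eq_uniq lines []
  simp at h
  rw [pvUniqLoop_eq lines.length lines (Nat.le_refl _), PySem.List.dedup_eq_ofList,
    PySem.Set.ofList_eq_foldl]
  have : PySem.Set.update ([] : List String) lines = List.foldl PySem.Set.add [] lines := rfl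
  rw [← this, h]
  simp

theorem pvPairs_append (t : List String) (ln : String) :
    pvPairs (t ++ [ln]) = pvPairs t ++ [(ln, (t.length : Int))] := by
  simp [pvPairs, PySem.List.enumerate_append, PySem.List.enumerate]

theorem pvContains_pairs (t : List String) (ln : String) :
    (PySem.Dict.mk (pvPairs t)).contains ln = t.contains ln := by
  induction t using List.reverseRecOn with
  | nil => simp [pvPairs, PySem.List.enumerate, PySem.Dict.contains]
  | append_singleton t x ih =>
      simp [pvPairs_append, PySem.Dict.contains] at *
      rw [ih]
      rcases eq_or_ne x ln with hx | hx
      · subst hx; simp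
      · have h1 : (x == ln) = false := by simp [hx]
        have h2 : decide (ln = x) = false := by simp [Ne.symm hx]
        rw [h1, h2]

theorem pvLoop (lines : List String) (t : List String) :
    lines.foldl pvStep (t, PySem.Dict.mk (pvPairs t)) =
      (PySem.Set.update t lines, PySem.Dict.mk (pvPairs (PySem.Set.update t lines))) := by
  induction lines generalizing t with
  | nil => simp [PySem.Set.update]
  | cons ln rest ih =>
      have hupd : PySem.Set.update t (ln :: rest) = PySem.Set.update (PySem.Set.add t ln) rest := by
        simp [PySem.Set.update]
      rw [List.foldl_cons, hupd]
      by_cases h : t.contains ln = true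
      · have hm : ln ∈ t := by simpa using h
        have hadd : PySem.Set.add t ln = t := by simp [PySem.Set.add, PySem.Set.contains, hm]
        rw [hadd]
        have hstep : pvStep (t, PySem.Dict.mk (pvPairs t)) ln = (t, PySem.Dict.mk (pvPairs t)) := by
          simp only [pvStep, pvContains_pairs, h]
          simp
        rw [hstep, ih]
      · have hm : ln ∉ t := by simpa using h
        have h' : t.contains ln = false := by simpa using h
        have hadd : PySem.Set.add t ln = t ++ [ln] := by
          simp [PySem.Set.add, PySem.Set.contains, hm]
        have hfresh : (PySem.Dict.mk (pvPairs t)).insert ln (t.length : Int) =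
            PySem.Dict.mk (pvPairs (t ++ [ln])) := by
          apply PySem.Dict.ext
          rw [PySem.Dict.items_insert_of_not_contains _ _ (by rw [pvContains_pairs]; exact h')]
          simp [pvPairs_append]
        have hstep : pvStep (t, PySem.Dict.mk (pvPairs t)) ln =
            (t ++ [ln], PySem.Dict.mk (pvPairs (t ++ [ln]))) := by
          simp only [pvStep, pvContains_pairs, h', hfresh]
          simp
        rw [hadd, hstep, ih]

theorem pvFoldl_flat (chunks : List String) (s : List String × PySem.Dict String Int) :
    chunks.foldl (fun s chunk => (split_lines_keepends chunk).foldl pvStep s) s =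
      (chunks.flatMap (fun chunk => split_lines_keepends chunk)).foldl pvStep s := by
  induction chunks generalizing s with
  | nil => rfl
  | cons c rest ih => simp [List.flatMap_cons, List.foldl_append, ih]

theorem pvIndex_items (t : List String) (hn : t.Nodup) :
    ((PySem.List.enumerate t 0).foldl (fun d p => d.insert p.2 p.1)
        (PySem.Dict.empty : PySem.Dict String Int)).items = pvPairs t := by
  refine Eq.trans (PySem.Dict.items_foldl_insert_fresh (PySem.List.enumerate t 0)
    (fun p => p.2) (fun p => p.1) PySem.Dict.empty ?_ ?_) ?_
  · intro a _; rfl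
  · rw [PySem.List.map_snd_enumerate]; exact hn
  · simp [pvPairs, PySem.Dict.empty]

-- ===== VERDICT (by name: the statement is the Claim_ definition above) =====
theorem build_line_table_spec : Claim_equal_build_line_table := by
  intro chunks _
  unfold Spec_build_line_table build_line_table build_line_table_alt
  have hempty : (PySem.Dict.empty : PySem.Dict String Int) = PySem.Dict.mk (pvPairs []) := by
    apply PySem.Dict.ext; simp [pvPairs, PySem.List.enumerate, PySem.Dict.empty]
  have hstepeq : (fun (s : List String × PySem.Dict String Int) ln =>
      if s.2.contains ln then s
      else (s.1 ++ [ln], s.2.insert ln (s.1.length : Int))) = pvStep := by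
    funext s ln; simp [pvStep]
  simp only [hempty, hstepeq]
  rw [pvFoldl_flat, pvLoop]
  have hupd : PySem.Set.update ([] : List String)
      (chunks.flatMap (fun chunk => split_lines_keepends chunk)) =
      uniqLoop [] (chunks.flatMap (fun chunk => split_lines_keepends chunk)) := by
    rw [pvUniqLoop_dedup, PySem.List.dedup_eq_ofList, PySem.Set.ofList_eq_foldl]
    rfl
  rw [hupd]
  have hnodup : (uniqLoop [] (chunks.flatMap (fun chunk => split_lines_keepends chunk))).Nodup := by
    rw [pvUniqLoop_dedup]; exact PySem.List.nodup_dedup _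
  rw [← hempty, pvIndex_items _ hnodup]
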